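-- pv_equiv track=rewrite | github.com/ShubhamS2005/AdobeIndiaHackathon_task1 | Extractor.py | clean_ocr_artifacts
-- ===== SOURCE A (Python) =====
-- def clean_ocr_artifacts(text):
--     words = text.split()
--     cleaned = []
--     for i, word in enumerate(words):
--         if i >= 2 and word == words[i - 1] == words[i - 2]:
--             continue
--         cleaned.append(word)
--     return ' '.join(cleaned)
-- ===== SOURCE B (Python) =====
-- def clean_ocr_artifacts(text):
--     words = text.split()
--     cleaned = []
--     i = 0
--     n = len(words)
--     while i < n:
--         j = i
--         while j < n and words[j] == words[i]:
--             j += 1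
--         cleaned.extend([words[i]] * min(j - i, 2))
--         i = j
--     return ' '.join(cleaned)
-- ===== Notes on version B (the rewrite author's own statement) =====
-- stated objective: alternative
-- what changed: Replaces A's index-lookback filter (skip word i when it equals words[i-1] and words[i-2]) with a group-then-truncate pass: split the words into maximal runs of equal consecutive words and keep min(run length, 2) copies of each.
import Mathlib
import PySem

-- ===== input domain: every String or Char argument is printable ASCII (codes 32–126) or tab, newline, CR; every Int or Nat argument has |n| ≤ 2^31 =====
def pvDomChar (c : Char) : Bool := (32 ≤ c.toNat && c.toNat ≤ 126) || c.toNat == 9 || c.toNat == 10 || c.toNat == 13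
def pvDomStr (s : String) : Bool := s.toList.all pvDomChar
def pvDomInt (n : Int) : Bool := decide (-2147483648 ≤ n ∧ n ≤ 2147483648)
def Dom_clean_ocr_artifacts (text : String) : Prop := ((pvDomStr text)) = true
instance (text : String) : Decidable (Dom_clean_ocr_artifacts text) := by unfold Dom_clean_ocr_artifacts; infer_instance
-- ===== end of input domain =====

-- B replaces A's index-lookback single pass with a group-runs-then-truncate decomposition (objective: idiomatic/alternative; same O(n) cost).


-- ===== PORT A =====
-- literal port: for i, word in enumerate(words): skip when i >= 2 and word == words[i-1] == words[i-2]
def clean_ocr_artifacts (text : String) : String :=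
  let words := PySem.Str.split₀ text
  let cleaned := (PySem.List.enumerate words 0).foldl
    (fun c p =>
      if 2 ≤ p.1 ∧ some p.2 = PySem.List.pyGet? words (p.1 - 1) ∧
         PySem.List.pyGet? words (p.1 - 1) = PySem.List.pyGet? words (p.1 - 2)
      then c else c ++ [p.2]) []
  PySem.Str.join " " cleaned

-- ===== PORT B =====
-- port of Source B's outer while loop: each iteration takes one maximal run of equal
-- consecutive words (the inner while = takeWhile/dropWhile) and keeps min(len, 2) copies
def pvRunClean : List String → List String
  | [] => []
  | w :: ws =>
    List.replicate (min ((ws.takeWhile (· = w)).length + 1) 2) w ++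
      pvRunClean (ws.dropWhile (· = w))
termination_by l => l.length
decreasing_by
  simpa [Nat.lt_succ_iff] using List.length_dropWhile_le (· = w) ws

def clean_ocr_artifacts_alt (text : String) : String :=
  PySem.Str.join " " (pvRunClean (PySem.Str.split₀ text))

-- ===== PRECONDITION & SPEC =====
def Spec_clean_ocr_artifacts (text : String) (out : String) : Prop := out = clean_ocr_artifacts_alt text
instance (text : String) (out : String) : Decidable (Spec_clean_ocr_artifacts text out) := by unfold Spec_clean_ocr_artifacts; infer_instance

-- ===== CLAIM (what is proved, stated in full; the proofs are below) =====
def Claim_equal_clean_ocr_artifacts : Prop := ∀ (text : String), Dom_clean_ocr_artifacts text → Spec_clean_ocr_artifacts text (clean_ocr_artifacts text)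

-- ===== LEMMAS AND PROOFS =====

-- common skeleton: walk the word list keeping the two previously emitted-or-seen words
def pvFAux : Option String → Option String → List String → List String
  | _, _, [] => []
  | p2, p1, w :: ws =>
    if some w = p1 ∧ p1 = p2 then pvFAux p2 p1 ws else w :: pvFAux p1 (some w) ws

-- the two lookback values A reads at index k
def pvPrev (words : List String) (k : Int) : Option String :=
  if 1 ≤ k then PySem.List.pyGet? words (k - 1) else none
def pvPrev2 (words : List String) (k : Int) : Option String :=
  if 2 ≤ k then PySem.List.pyGet? words (k - 2) else none

theorem pvF_reset (p2 p1 : Option String) (xs : List String) (h : p2 ≠ p1) :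
    pvFAux p2 p1 xs = pvFAux none p1 xs := by
  cases xs with
  | nil => rfl
  | cons w ws =>
    have h1 : ¬ (some w = p1 ∧ p1 = p2) := fun hc => h hc.2.symm
    have h2 : ¬ (some w = p1 ∧ p1 = (none : Option String)) := by
      rintro ⟨ha, hb⟩; rw [hb] at ha; exact absurd ha (by simp)
    simp only [pvFAux, if_neg h1, if_neg h2]

theorem pvF_fresh (p2 p1 : Option String) (w : String) (ws : List String) (h : p1 ≠ some w) :
    pvFAux p2 p1 (w :: ws) = w :: pvFAux none (some w) ws := by
  simp only [pvFAux]
  rw [if_neg (fun hc => h hc.1.symm)]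
  rw [pvF_reset p1 (some w) ws h]

theorem pvF_none (p2 p1 : Option String) (xs : List String)
    (h : ∀ y, xs.head? = some y → p1 ≠ some y) :
    pvFAux p2 p1 xs = pvFAux none none xs := by
  cases xs with
  | nil => rfl
  | cons r t =>
    rw [pvF_fresh p2 p1 r t (h r rfl), pvF_fresh none none r t (by simp)]

theorem pvF_skip (w : String) (run rest : List String) (h : ∀ x ∈ run, x = w) :
    pvFAux (some w) (some w) (run ++ rest) = pvFAux (some w) (some w) rest := by
  induction run with
  | nil => rfl
  | cons x t ih =>
    have hx : x = w := h x (by simp)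
    rw [List.cons_append]
    rw [show pvFAux (some w) (some w) (x :: (t ++ rest))
        = pvFAux (some w) (some w) (t ++ rest) from by
      simp [pvFAux, hx]]
    exact ih (fun y hy => h y (by simp [hy]))

-- B's run loop computes the two-lookback skeleton
theorem pvB_eq (ws : List String) : pvRunClean ws = pvFAux none none ws := by
  induction ws using pvRunClean.induct with
  | case1 => simp [pvRunClean, pvFAux]
  | case2 w ws ih =>
    obtain ⟨run, rest, hrun, hdw, hws⟩ :
        ∃ run rest, ws.takeWhile (· = w) = run ∧ ws.dropWhile (· = w) = rest ∧
          ws = run ++ rest :=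
      ⟨_, _, rfl, rfl, List.takeWhile_append_dropWhile.symm⟩
    have hall : ∀ z ∈ run, z = w := by
      intro z hz
      rw [← hrun] at hz
      simpa using List.mem_takeWhile_imp hz
    have hrest : ∀ y, rest.head? = some y → y ≠ w := by
      intro y hy
      have := List.head?_dropWhile_not (· = w) ws
      rw [hdw, hy] at this
      simpa using this
    rw [pvF_fresh none none w ws (by simp)]
    rw [show pvRunClean (w :: ws) =
      List.replicate (min ((ws.takeWhile (· = w)).length + 1) 2) w ++
        pvRunClean (ws.dropWhile (· = w)) from by rw [pvRunClean]]
    rw [hdw] at ih ⊢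
    rw [hrun]
    have hrest' : ∀ y, rest.head? = some y → (some w : Option String) ≠ some y :=
      fun y hy => by simpa using (hrest y hy).symm
    cases run with
    | nil =>
      simp only [List.nil_append] at hws
      rw [hws]
      simp only [List.length_nil, Nat.zero_add]
      rw [show min 1 2 = 1 from rfl, List.replicate_one, List.singleton_append]
      rw [ih, pvF_none none (some w) rest hrest']
    | cons x run' =>
      have hx : x = w := hall x (by simp)
      rw [hws, hx]
      simp only [List.length_cons]
      rw [show min (run'.length + 1 + 1) 2 = 2 from by omega]
      rw [show List.replicate 2 w = [w, w] from rfl]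
      rw [show pvFAux none (some w) ((w :: run') ++ rest)
          = w :: pvFAux (some w) (some w) (run' ++ rest) from by
        rw [List.cons_append]
        simp only [pvFAux]
        rw [if_neg (by rintro ⟨-, hb⟩; exact absurd hb (by simp))]]
      rw [pvF_skip w run' rest (fun z hz => hall z (by simp [hz]))]
      rw [pvF_none (some w) (some w) rest hrest']
      rw [ih]
      rfl

-- A's enumerate fold computes the two-lookback skeleton
theorem pvA_loop (words : List String) (suffix : List String) :
    ∀ (k : Nat) (acc : List String), words.drop k = suffix →
    (PySem.List.enumerate suffix (k : Int)).foldl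
      (fun c p =>
        if 2 ≤ p.1 ∧ some p.2 = PySem.List.pyGet? words (p.1 - 1) ∧
           PySem.List.pyGet? words (p.1 - 1) = PySem.List.pyGet? words (p.1 - 2)
        then c else c ++ [p.2]) acc
    = acc ++ pvFAux (pvPrev2 words k) (pvPrev words k) suffix := by
  induction suffix with
  | nil => intro k acc _; simp [PySem.List.enumerate_nil, pvFAux]
  | cons w ws ih =>
    intro k acc hdrop
    have hget : words[k]? = some w := by
      have h0 : (words.drop k)[0]? = some w := by rw [hdrop]; rfl
      rw [List.getElem?_drop] at h0
      simpa using h0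
    have hdrop' : words.drop (k + 1) = ws := by
      have h1 : words.drop (k + 1) = (words.drop k).drop 1 := by rw [List.drop_drop]
      rw [h1, hdrop]; rfl
    rw [PySem.List.enumerate_cons, List.foldl_cons]
    rw [show ((k : Int) + 1) = (((k + 1 : Nat)) : Int) from by push_cast; ring]
    rw [ih (k + 1) _ hdrop']
    have hprev1 : pvPrev words (((k + 1 : Nat)) : Int) = some w := by
      unfold pvPrev
      rw [if_pos (by push_cast; omega)]
      rw [show (((k + 1 : Nat)) : Int) - 1 = ((k : Nat) : Int) from by push_cast; ring]
      rw [PySem.List.pyGet?_natCast]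
      exact hget
    have hprev2 : pvPrev2 words (((k + 1 : Nat)) : Int) = pvPrev words (k : Int) := by
      unfold pvPrev2 pvPrev
      rw [show (((k + 1 : Nat)) : Int) - 2 = ((k : Nat) : Int) - 1 from by push_cast; ring]
      by_cases hk : 1 ≤ (k : Int)
      · rw [if_pos (by push_cast at hk ⊢; omega), if_pos hk]
      · rw [if_neg (by push_cast at hk ⊢; omega), if_neg hk]
    rw [hprev1, hprev2]
    -- the loop's test at index k is exactly the skeleton's test
    have hcond : (2 ≤ (k : Int) ∧ some w = PySem.List.pyGet? words ((k : Int) - 1) ∧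
           PySem.List.pyGet? words ((k : Int) - 1) = PySem.List.pyGet? words ((k : Int) - 2))
        ↔ (some w = pvPrev words k ∧ pvPrev words k = pvPrev2 words k) := by
      unfold pvPrev pvPrev2
      by_cases hk2 : 2 ≤ (k : Int)
      · rw [if_pos (by omega), if_pos hk2]
        exact ⟨fun h => ⟨h.2.1, h.2.2⟩, fun h => ⟨hk2, h.1, h.2⟩⟩
      · rw [if_neg hk2]
        by_cases hk1 : 1 ≤ (k : Int)
        · rw [if_pos hk1]
          constructor
          · rintro ⟨ha, -⟩; exact absurd ha hk2
          · rintro ⟨hb, hc⟩; exact absurd (hb.trans hc) (by simp)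
        · rw [if_neg hk1]
          constructor
          · rintro ⟨ha, -⟩; exact absurd ha hk2
          · rintro ⟨hb, -⟩; exact absurd hb (by simp)
    by_cases hC : some w = pvPrev words k ∧ pvPrev words k = pvPrev2 words k
    · rw [if_pos (hcond.mpr hC)]
      have hp1 : pvPrev words (k : Int) = some w := hC.1.symm
      have hp2 : pvPrev2 words (k : Int) = some w := hC.2.symm.trans hp1
      rw [show pvFAux (pvPrev2 words k) (pvPrev words k) (w :: ws)
          = pvFAux (pvPrev2 words k) (pvPrev words k) ws from by
        simp only [pvFAux]; rw [if_pos ⟨hC.1, hC.2⟩]]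
      rw [hp1, hp2]
    · rw [if_neg (fun hc => hC (hcond.mp hc))]
      rw [show pvFAux (pvPrev2 words k) (pvPrev words k) (w :: ws)
          = w :: pvFAux (pvPrev words k) (some w) ws from by
        simp only [pvFAux]
        rw [if_neg (fun hc => hC ⟨hc.1, hc.2⟩)]]
      simp

-- ===== VERDICT (by name: the statement is the Claim_ definition above) =====
theorem clean_ocr_artifacts_spec : Claim_equal_clean_ocr_artifacts := by
  intro text _
  have h := pvA_loop (PySem.Str.split₀ text) (PySem.Str.split₀ text) 0 [] (by simp)
  have hp1 : pvPrev (PySem.Str.split₀ text) ((0 : Nat) : Int) = none := by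
    unfold pvPrev; rw [if_neg (by omega)]
  have hp2 : pvPrev2 (PySem.Str.split₀ text) ((0 : Nat) : Int) = none := by
    unfold pvPrev2; rw [if_neg (by omega)]
  rw [hp1, hp2] at h
  simp only [Nat.cast_zero, List.nil_append] at h
  unfold Spec_clean_ocr_artifacts clean_ocr_artifacts clean_ocr_artifacts_alt
  dsimp only
  rw [h, pvB_eq]
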